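-- pv_equiv track=rewrite | github.com/JiwonHae94/AlgorithmStudy | 0927/042626.py | solution
-- ===== SOURCE A (Python) =====
-- import heapq
--
-- def solution(scoville, K):
--     answer = 0
--     heapq.heapify(scoville)
--     while(True):
--         if scoville[0] >=K:
--             return answer
--         elif len(scoville) == 1:
--             return -1
--         else :
--             a = heapq.heappop(scoville)
--             b = heapq.heappop(scoville)
--             c = a+b*2
--             heapq.heappush(scoville,c)
--             answer +=1
--
--     return answer
-- ===== SOURCE B (Python) =====
-- def solution(scoville, K):
--     # Sorted-list maintenance instead of a heap; mutates scoville in place like the original.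
--     scoville.sort()
--     answer = 0
--     while True:
--         if scoville[0] >= K:
--             return answer
--         if len(scoville) == 1:
--             return -1
--         a = scoville.pop(0)
--         b = scoville.pop(0)
--         c = a + 2 * b
--         i = 0
--         while i < len(scoville) and scoville[i] < c:
--             i += 1
--         scoville.insert(i, c)
--         answer += 1
-- ===== Notes on version B (the rewrite author's own statement) =====
-- stated objective: alternative
-- what changed: Replaces the binary heap by a fully sorted list maintained in place: sort once, pop the two smallest from the front, and reinsert the mix at its sorted position by a scan, instead of heapify/heappop/heappush.
import Mathlib
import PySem

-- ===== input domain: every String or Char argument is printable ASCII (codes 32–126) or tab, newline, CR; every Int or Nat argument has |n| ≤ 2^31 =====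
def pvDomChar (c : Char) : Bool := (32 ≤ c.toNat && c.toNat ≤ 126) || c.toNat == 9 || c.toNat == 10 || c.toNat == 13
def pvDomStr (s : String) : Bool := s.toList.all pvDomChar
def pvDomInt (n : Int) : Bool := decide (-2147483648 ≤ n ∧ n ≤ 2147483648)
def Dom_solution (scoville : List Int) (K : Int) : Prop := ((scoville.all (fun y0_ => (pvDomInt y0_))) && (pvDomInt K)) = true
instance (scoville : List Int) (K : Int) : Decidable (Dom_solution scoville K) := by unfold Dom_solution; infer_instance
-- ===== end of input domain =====

-- B maintains a fully sorted list in place of A's binary heap; both mutate `scoville` in Python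
-- (to different final states), so the equivalence proved here is about the return value only.

-- ===== PORT A =====
-- A uses the heapq library; its calls are ported as the operations of a mergeable min-heap
-- (heapify = fold of push, heappop = root then merge of the children, heappush = merge with a singleton).
inductive SkewHeap where
  | leaf : SkewHeap
  | node : Int → SkewHeap → SkewHeap → SkewHeap
deriving DecidableEq, Repr

def SkewHeap.merge : SkewHeap → SkewHeap → SkewHeap
  | .leaf, h => h
  | h, .leaf => h
  | .node x l r, .node y l' r' =>
    if x ≤ y then .node x (SkewHeap.merge r (.node y l' r')) l
    else .node y (SkewHeap.merge (.node x l r) r') l'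

-- heappush
def SkewHeap.push (h : SkewHeap) (x : Int) : SkewHeap :=
  h.merge (.node x .leaf .leaf)

def SkewHeap.toList : SkewHeap → List Int
  | .leaf => []
  | .node x l r => x :: (l.toList ++ r.toList)

-- len(scoville)
def SkewHeap.size (h : SkewHeap) : Nat := h.toList.length

-- heapq.heapify(scoville)
def SkewHeap.ofList (xs : List Int) : SkewHeap :=
  xs.foldl SkewHeap.push .leaf

-- the while(True) loop of A; fuel = initial length (the size drops by exactly 1 per iteration,
-- and the loop returns at size 1 at the latest, so the fuel-0 branch is never reached)
def loopA : Nat → SkewHeap → Int → Int → Int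
  | 0, _, _, _ => -1   -- unreachable
  | fuel + 1, h, K, answer =>
    match h with
    | .leaf => -1      -- unreachable: scoville[0] raises on an empty list (outside Pre_)
    | .node x l r =>
      if x ≥ K then answer
      else if h.size == 1 then -1
      else
        let h1 := l.merge r            -- a = heappop(scoville)  (a = x)
        match h1 with
        | .leaf => -1                  -- unreachable: the size is ≥ 2 here
        | .node y l2 r2 =>             -- b = heappop(scoville)  (b = y)
          loopA fuel ((l2.merge r2).push (x + y * 2)) K (answer + 1)

def solution (scoville : List Int) (K : Int) : Int :=
  loopA scoville.length (SkewHeap.ofList scoville) K 0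

-- ===== PORT B =====
-- the inner `while i < len(scoville) and scoville[i] < c` scan + insert of Source B
def insertSorted (c : Int) : List Int → List Int
  | [] => [c]
  | b :: t => if b < c then b :: insertSorted c t else c :: b :: t

-- the outer while loop of Source B; same fuel discipline as loopA
def loopB : Nat → List Int → Int → Int → Int
  | 0, _, _, _ => -1   -- unreachable
  | fuel + 1, s, K, answer =>
    match s with
    | [] => -1         -- unreachable: scoville[0] raises on an empty list (outside Pre_)
    | a :: t =>
      if a ≥ K then answer
      else if s.length == 1 then -1
      else
        match t with
        | [] => -1     -- unreachable: the length is ≥ 2 here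
        | b :: t2 =>
          loopB fuel (insertSorted (a + 2 * b) t2) K (answer + 1)

def solution_alt (scoville : List Int) (K : Int) : Int :=
  loopB scoville.length (PySem.List.sorted scoville (fun x => x) false) K 0

-- ===== PRECONDITION & SPEC =====
-- Pre_ excludes only the empty list, on which A's `scoville[0]` raises IndexError.
def Pre_solution (scoville : List Int) (K : Int) : Prop := scoville ≠ []
instance (scoville : List Int) (K : Int) : Decidable (Pre_solution scoville K) := by
  unfold Pre_solution; infer_instance

def pvWitness_solution : List Int × Int := ([1, 2, 3, 9, 10, 12], 7)

def Spec_solution (scoville : List Int) (K : Int) (out : Int) : Prop := out = solution_alt scoville K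
instance (scoville : List Int) (K : Int) (out : Int) : Decidable (Spec_solution scoville K out) := by unfold Spec_solution; infer_instance

-- ===== CLAIM (what is proved, stated in full; the proofs are below) =====
def Claim_equal_solution : Prop := ∀ (scoville : List Int) (K : Int), Dom_solution scoville K → Pre_solution scoville K → Spec_solution scoville K (solution scoville K)

-- ===== LEMMAS AND PROOFS =====

-- heap-order predicate: every root is ≤ everything below it
def SkewHeap.HOrd : SkewHeap → Prop
  | .leaf => True
  | .node x l r => (∀ y ∈ l.toList, x ≤ y) ∧ (∀ y ∈ r.toList, x ≤ y) ∧ l.HOrd ∧ r.HOrd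

theorem toList_merge_ms (h1 h2 : SkewHeap) :
    ((h1.merge h2).toList : Multiset Int) = ↑h1.toList + ↑h2.toList := by
  induction h1, h2 using SkewHeap.merge.induct with
  | case1 h => simp [SkewHeap.merge, SkewHeap.toList]
  | case2 h hne => cases h <;> simp [SkewHeap.merge, SkewHeap.toList]
  | case3 x l r y l' r' hxy ih =>
    simp only [SkewHeap.merge, if_pos hxy, SkewHeap.toList, ← Multiset.cons_coe,
      ← Multiset.coe_add, ← Multiset.singleton_add, ih] at *
    abel
  | case4 x l r y l' r' hxy ih =>
    simp only [SkewHeap.merge, if_neg hxy, SkewHeap.toList, ← Multiset.cons_coe,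
      ← Multiset.coe_add, ← Multiset.singleton_add, ih] at *
    abel

theorem toList_merge (h1 h2 : SkewHeap) :
    (h1.merge h2).toList.Perm (h1.toList ++ h2.toList) := by
  rw [← Multiset.coe_eq_coe, toList_merge_ms, Multiset.coe_add]

theorem root_le (x : Int) (l r : SkewHeap) (o : (SkewHeap.node x l r).HOrd) :
    ∀ y ∈ (SkewHeap.node x l r).toList, x ≤ y := by
  intro y hy
  simp only [SkewHeap.toList, List.mem_cons, List.mem_append] at hy
  rcases hy with rfl | hy | hy
  · exact le_refl _
  · exact o.1 y hy
  · exact o.2.1 y hy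

theorem hord_merge (h1 h2 : SkewHeap) (o1 : h1.HOrd) (o2 : h2.HOrd) :
    (h1.merge h2).HOrd := by
  induction h1, h2 using SkewHeap.merge.induct with
  | case1 h => simpa [SkewHeap.merge] using o2
  | case2 h hne => cases h <;> simpa [SkewHeap.merge] using o1
  | case3 x l r y l' r' hxy ih =>
    simp only [SkewHeap.merge, if_pos hxy]
    refine ⟨?_, o1.1, ih o1.2.2.2 o2, o1.2.2.1⟩
    intro z hz
    have := (toList_merge r (.node y l' r')).mem_iff.mp hz
    rcases List.mem_append.mp this with hz | hz
    · exact o1.2.1 z hz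
    · exact le_trans hxy (root_le y l' r' o2 z hz)
  | case4 x l r y l' r' hxy ih =>
    simp only [SkewHeap.merge, if_neg hxy]
    refine ⟨?_, o2.1, ih o1 o2.2.2.2, o2.2.2.1⟩
    intro z hz
    have := (toList_merge (.node x l r) r').mem_iff.mp hz
    rcases List.mem_append.mp this with hz | hz
    · exact le_trans (le_of_not_ge hxy) (root_le x l r o1 z hz)
    · exact o2.2.1 z hz

theorem insertSorted_perm (c : Int) (s : List Int) :
    (insertSorted c s).Perm (c :: s) := by
  induction s with
  | nil => simp [insertSorted]
  | cons b t ih =>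
    simp only [insertSorted]
    split
    · exact ((ih.cons b).trans (List.Perm.swap c b t))
    · exact List.Perm.refl _

theorem insertSorted_pairwise (c : Int) (s : List Int) (hs : s.Pairwise (· ≤ ·)) :
    (insertSorted c s).Pairwise (· ≤ ·) := by
  induction s with
  | nil => simp [insertSorted]
  | cons b t ih =>
    simp only [insertSorted]
    rcases List.pairwise_cons.mp hs with ⟨hb, ht⟩
    split
    · rename_i hbc
      refine List.pairwise_cons.mpr ⟨?_, ih ht⟩
      intro z hz
      rcases List.mem_cons.mp ((insertSorted_perm c t).mem_iff.mp hz) with rfl | h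
      · exact le_of_lt hbc
      · exact hb z h
    · rename_i hbc
      refine List.pairwise_cons.mpr ⟨?_, hs⟩
      intro z hz
      rcases List.mem_cons.mp hz with rfl | h
      · omega
      · exact le_trans (by omega) (hb z h)

theorem toList_push (h : SkewHeap) (x : Int) : (h.push x).toList.Perm (x :: h.toList) := by
  refine (toList_merge h _).trans ?_
  simp [SkewHeap.toList]

theorem toList_ofList (xs : List Int) : (SkewHeap.ofList xs).toList.Perm xs := by
  suffices H : ∀ (h : SkewHeap), (xs.foldl SkewHeap.push h).toList.Perm (h.toList ++ xs) by
    simpa [SkewHeap.ofList, SkewHeap.toList] using H .leaf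
  induction xs with
  | nil => simp
  | cons a t ih =>
    intro h
    simp only [List.foldl_cons]
    refine (ih (h.push a)).trans ?_
    have := (toList_push h a).append_right t
    refine this.trans ?_
    simpa using List.perm_middle.symm

theorem hord_ofList (xs : List Int) : (SkewHeap.ofList xs).HOrd := by
  suffices H : ∀ (h : SkewHeap), h.HOrd → (xs.foldl SkewHeap.push h).HOrd by
    exact H .leaf trivial
  induction xs with
  | nil => intro h hh; simpa using hh
  | cons a t ih =>
    intro h hh
    exact ih _ (hord_merge h _ hh (by simp [SkewHeap.HOrd, SkewHeap.toList]))

-- the two loops agree whenever the heap and the sorted list hold the same multiset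
theorem loop_eq (fuel : Nat) (h : SkewHeap) (s : List Int) (K ans : Int)
    (hperm : h.toList.Perm s) (hord : h.HOrd) (hsort : s.Pairwise (· ≤ ·)) :
    loopA fuel h K ans = loopB fuel s K ans := by
  induction fuel generalizing h s ans with
  | zero => simp [loopA, loopB]
  | succ fuel ih =>
    cases h with
    | leaf =>
      have hs : s = [] := List.Perm.nil_eq (by simpa [SkewHeap.toList] using hperm) |>.symm
      subst hs
      simp [loopA, loopB]
    | node x l r =>
      have hmem : x ∈ s := hperm.mem_iff.mp (by simp [SkewHeap.toList])
      obtain ⟨a, t, rfl⟩ : ∃ a t, s = a :: t := by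
        cases s with
        | nil => simp at hmem
        | cons a t => exact ⟨a, t, rfl⟩
      have hxa : x = a := by
        refine le_antisymm (root_le x l r hord a (hperm.mem_iff.mpr (by simp))) ?_
        rcases List.mem_cons.mp hmem with rfl | hx
        · exact le_refl _
        · exact (List.pairwise_cons.mp hsort).1 x hx
      subst hxa
      have hperm' : (l.toList ++ r.toList).Perm t := by
        have := hperm
        simp only [SkewHeap.toList] at this
        exact this.cons_inv
      have hlen : (SkewHeap.node x l r).size = (x :: t).length := by
        simpa [SkewHeap.size] using hperm.length_eq
      simp only [loopA, loopB, hlen]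
      by_cases hK : x ≥ K
      · simp [hK]
      · simp only [hK, if_false]
        by_cases h1 : (x :: t).length = 1
        · simp [h1]
        · have hbe : ((x :: t).length == 1) = false := by simpa using h1
          simp only [hbe, Bool.false_eq_true, if_false]
          obtain ⟨b, t2, rfl⟩ : ∃ b t2, t = b :: t2 := by
            cases t with
            | nil => simp at h1
            | cons b t2 => exact ⟨b, t2, rfl⟩
          have hmt : (l.merge r).toList.Perm (b :: t2) :=
            (toList_merge l r).trans hperm'
          have hordm : (l.merge r).HOrd := hord_merge l r hord.2.2.1 hord.2.2.2
          obtain ⟨y, l2, r2, hm⟩ : ∃ y l2 r2, l.merge r = SkewHeap.node y l2 r2 := by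
            cases hml : l.merge r with
            | leaf => rw [hml] at hmt; simp [SkewHeap.toList] at hmt
            | node y l2 r2 => exact ⟨y, l2, r2, rfl⟩
          rw [hm] at hmt hordm
          have hsort' : (b :: t2).Pairwise (· ≤ ·) := (List.pairwise_cons.mp hsort).2
          have hyb : y = b := by
            refine le_antisymm (root_le y l2 r2 hordm b (hmt.mem_iff.mpr (by simp))) ?_
            have hy : y ∈ b :: t2 := hmt.mem_iff.mp (by simp [SkewHeap.toList])
            rcases List.mem_cons.mp hy with rfl | hy
            · exact le_refl _
            · exact (List.pairwise_cons.mp hsort').1 y hy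
          subst hyb
          have hperm2 : (l2.toList ++ r2.toList).Perm t2 := by
            have := hmt
            simp only [SkewHeap.toList] at this
            exact this.cons_inv
          simp only [hm]
          have hc : x + y * 2 = x + 2 * y := by ring
          rw [hc]
          refine ih _ _ _ ?_ ?_ ?_
          · refine (toList_push _ _).trans ?_
            refine ((toList_merge l2 r2).trans hperm2).cons _ |>.trans ?_
            exact (insertSorted_perm _ _).symm
          · refine hord_merge _ _ (hord_merge l2 r2 hordm.2.2.1 hordm.2.2.2) ?_
            simp [SkewHeap.HOrd, SkewHeap.toList]
          · exact insertSorted_pairwise _ _ (List.pairwise_cons.mp hsort').2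

-- ===== VERDICT (by name: the statement is the Claim_ definition above) =====
theorem solution_spec : Claim_equal_solution := by
  intro scoville K _ _
  unfold Spec_solution solution solution_alt
  have hperm : (SkewHeap.ofList scoville).toList.Perm (PySem.List.sorted scoville (fun x => x) false) :=
    (toList_ofList scoville).trans (PySem.List.sorted_perm scoville (fun x => x) false).symm
  have hlen : (PySem.List.sorted scoville (fun x => x) false).length = scoville.length :=
    PySem.List.length_sorted ..
  rw [← hlen]
  exact loop_eq _ _ _ K 0 hperm (hord_ofList scoville)
    (PySem.List.sorted_pairwise scoville (fun x => x))
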